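-- pv_equiv track=rewrite | github.com/TylerEnglish/Polymorphic_Data_Reporter | src/chart/common.py | colorway
-- ===== SOURCE A (Python) =====
-- from typing import Dict, List, Optional, Sequence, Tuple
--
-- def colorway(theme: Dict[str, object], n: Optional[int] = None) -> List[str]:
--     seq = list(theme["seq"])  # type: ignore
--     if n is None or n <= len(seq):
--         return seq[: n or len(seq)]
--     # cycle if more requested
--     out: List[str] = []
--     i = 0
--     while len(out) < n:
--         out.append(seq[i % len(seq)])
--         i += 1
--     return out
-- ===== SOURCE B (Python) =====
-- def colorway(theme, n=None):
--     seq = list(theme["seq"])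
--     if n is None or n <= len(seq):
--         return seq[: n or len(seq)]
--     L = len(seq)
--     return seq * (n // L) + seq[: n % L]
-- ===== Notes on version B (the rewrite author's own statement) =====
-- stated objective: simpler
-- what changed: The per-element while loop with an index counter and i % len(seq) indexing is replaced by a closed-form build: whole-sequence repetition (seq * (n // L)) plus one slice (seq[: n % L]).
import Mathlib
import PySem

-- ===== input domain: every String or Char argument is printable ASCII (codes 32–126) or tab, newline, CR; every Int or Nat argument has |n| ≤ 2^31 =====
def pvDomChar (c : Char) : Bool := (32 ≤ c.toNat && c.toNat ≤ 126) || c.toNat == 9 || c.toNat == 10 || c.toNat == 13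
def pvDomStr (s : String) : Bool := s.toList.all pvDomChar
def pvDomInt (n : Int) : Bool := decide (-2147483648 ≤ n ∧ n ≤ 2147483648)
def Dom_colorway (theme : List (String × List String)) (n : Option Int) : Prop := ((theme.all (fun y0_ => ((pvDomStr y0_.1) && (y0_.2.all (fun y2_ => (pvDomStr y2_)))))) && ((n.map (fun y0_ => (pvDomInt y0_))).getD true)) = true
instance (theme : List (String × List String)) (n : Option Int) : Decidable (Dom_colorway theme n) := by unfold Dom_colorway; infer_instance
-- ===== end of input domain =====

-- B replaces A's per-element while loop (index counter + i % len indexing) by whole-list repetition plus one slice; proven equal on Pre_.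


-- ===== PORT A =====
-- while len(out) < n: out.append(seq[i % len(seq)]); i += 1
-- seq[i % len(seq)] is ported as List.getD; exact whenever seq ≠ [] (i % len(seq) is then in range),
-- and Pre_ excludes seq = [] in this branch (Python raises ZeroDivisionError there).
def colorwayLoopA (seq : List String) (k : Int) (out : List String) (i : Nat) : List String :=
  if (out.length : Int) < k then
    colorwayLoopA seq k (out ++ [seq.getD (i % seq.length) ""]) (i + 1)
  else out
termination_by (k - out.length).toNat
decreasing_by simp only [List.length_append, List.length_cons, List.length_nil]; omega

def colorway (theme : List (String × List String)) (n : Option Int) : List String :=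
  -- theme["seq"]: KeyError (get? = none) excluded by Pre_
  let seq := ((PySem.Dict.mk theme).get? "seq").getD []
  match n with
  | none => PySem.List.slice seq none (some (seq.length : Int))
  | some k =>
    if k ≤ (seq.length : Int) then
      -- seq[: n or len(seq)]
      PySem.List.slice seq none (some (if k = 0 then (seq.length : Int) else k))
    else
      colorwayLoopA seq k [] 0

-- ===== PORT B =====
def colorway_alt (theme : List (String × List String)) (n : Option Int) : List String :=
  let seq := ((PySem.Dict.mk theme).get? "seq").getD []
  match n with
  | none => PySem.List.slice seq none (some (seq.length : Int))
  | some k =>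
    if k ≤ (seq.length : Int) then
      PySem.List.slice seq none (some (if k = 0 then (seq.length : Int) else k))
    else
      -- seq * (n // L) + seq[: n % L]
      (List.replicate (PySem.Int.floordiv k (seq.length : Int)).toNat seq).flatten
        ++ PySem.List.slice seq none (some (PySem.Int.mod k (seq.length : Int)))

-- ===== PRECONDITION & SPEC =====
-- Pre_ excludes exactly the inputs where A (and B) raise: a missing "seq" key (KeyError),
-- and an empty seq with n > 0 (ZeroDivisionError from i % 0 resp. n // 0).
def Pre_colorway (theme : List (String × List String)) (n : Option Int) : Prop :=
  (match (PySem.Dict.mk theme).get? "seq", n with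
   | none, _ => false
   | some _, none => true
   | some seq, some k => decide (k ≤ (seq.length : Int)) || decide (seq ≠ [])) = true
instance (theme : List (String × List String)) (n : Option Int) : Decidable (Pre_colorway theme n) := by unfold Pre_colorway; infer_instance

def pvWitness_colorway : (List (String × List String)) × Option Int := ([("seq", ["a", "b"])], some 5)

def Spec_colorway (theme : List (String × List String)) (n : Option Int) (out : List String) : Prop := out = colorway_alt theme n
instance (theme : List (String × List String)) (n : Option Int) (out : List String) : Decidable (Spec_colorway theme n out) := by unfold Spec_colorway; infer_instance

-- ===== CLAIM (what is proved, stated in full; the proofs are below) =====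
def Claim_equal_colorway : Prop := ∀ (theme : List (String × List String)) (n : Option Int), Dom_colorway theme n → Pre_colorway theme n → Spec_colorway theme n (colorway theme n)

-- ===== LEMMAS AND PROOFS =====

-- the cyclic word of length m over seq
def colorwayCyc (seq : List String) (m : Nat) : List String :=
  (List.range m).map (fun j => seq.getD (j % seq.length) "")

lemma colorwayLoopA_eq (seq : List String) (k : Int) :
    ∀ (m : Nat) (out : List String) (i : Nat), m = (k - out.length).toNat →
      colorwayLoopA seq k out i
        = out ++ (List.range m).map (fun j => seq.getD ((i + j) % seq.length) "") := by
  intro m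
  induction m with
  | zero =>
    intro out i hm
    rw [colorwayLoopA]
    simp only [List.range_zero, List.map_nil, List.append_nil]
    rw [if_neg (by omega)]
  | succ m ih =>
    intro out i hm
    rw [colorwayLoopA, if_pos (by omega)]
    rw [ih (out ++ [seq.getD (i % seq.length) ""]) (i + 1)
      (by simp only [List.length_append, List.length_cons, List.length_nil]; omega)]
    simp only [List.range_succ_eq_map, List.map_cons, List.map_map, List.append_assoc,
      List.cons_append, List.nil_append, Function.comp_def, Nat.add_zero]
    congr 1
    apply congrArg
    apply List.map_congr_left
    intro j _
    have hj : i + 1 + j = i + j.succ := by omega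
    rw [hj]

lemma colorwayCyc_take (seq : List String) (r : Nat) (hr : r ≤ seq.length) :
    List.take r seq = colorwayCyc seq r := by
  apply List.ext_getElem
  · simp [colorwayCyc]; omega
  · intro j h1 h2
    simp only [colorwayCyc, List.getElem_take, List.getElem_map, List.getElem_range]
    have hj : j < r := by simpa [colorwayCyc] using h2
    rw [Nat.mod_eq_of_lt (by omega), List.getD_eq_getElem _ _ (by omega)]

lemma colorwayCyc_add_len (seq : List String) (m : Nat) :
    colorwayCyc seq (seq.length + m) = seq ++ colorwayCyc seq m := by
  unfold colorwayCyc
  rw [List.range_add, List.map_append, List.map_map]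
  congr 1
  · have := colorwayCyc_take seq seq.length le_rfl
    simpa [colorwayCyc, List.take_length] using this.symm
  · apply List.map_congr_left
    intro j _
    simp [Function.comp, Nat.add_mod_left]

lemma colorway_flatten_eq (seq : List String) (q r : Nat) (hr : r ≤ seq.length) :
    (List.replicate q seq).flatten ++ List.take r seq = colorwayCyc seq (q * seq.length + r) := by
  induction q with
  | zero => simpa using colorwayCyc_take seq r hr
  | succ q ih =>
    have : (q + 1) * seq.length + r = seq.length + (q * seq.length + r) := by ring
    rw [this, colorwayCyc_add_len seq, List.replicate_succ, List.flatten_cons,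
      List.append_assoc, ih]

theorem colorway_spec : Claim_equal_colorway := by
  intro theme n _ hpre
  unfold Spec_colorway colorway colorway_alt
  cases hd : (PySem.Dict.mk theme).get? "seq" with
  | none => unfold Pre_colorway at hpre; rw [hd] at hpre; simp at hpre
  | some seq =>
    cases n with
    | none => rfl
    | some k =>
      simp only [Option.getD_some]
      by_cases hk : k ≤ (seq.length : Int)
      · rw [if_pos hk, if_pos hk]
      · rw [if_neg hk, if_neg hk]
        have hs : seq ≠ [] := by
          unfold Pre_colorway at hpre; rw [hd] at hpre
          simp only [Bool.or_eq_true, decide_eq_true_eq] at hpre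
          rcases hpre with h | h
          · exact absurd h hk
          · exact h
        have hL : 0 < (seq.length : Int) := by
          have : seq.length ≠ 0 := fun h => hs (List.eq_nil_of_length_eq_zero h)
          omega
        have hk0 : 0 ≤ k := by omega
        -- rewrite k as a Nat cast
        obtain ⟨m, rfl⟩ : ∃ m : Nat, k = (m : Int) := ⟨k.toNat, (Int.toNat_of_nonneg hk0).symm⟩
        rw [PySem.Int.floordiv_natCast, PySem.Int.mod_natCast]
        rw [PySem.List.slice_to_natCast]
        simp only [Int.toNat_natCast]
        rw [colorway_flatten_eq seq _ _ (le_of_lt (Nat.mod_lt _ (by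
          have : seq.length ≠ 0 := fun h => hs (List.eq_nil_of_length_eq_zero h); omega)))]
        rw [colorwayLoopA_eq seq (m : Int) m [] 0 (by simp)]
        simp only [List.nil_append, Nat.zero_add]
        have hmm : m / seq.length * seq.length + m % seq.length = m := by
          have := Nat.div_add_mod m seq.length
          rw [Nat.mul_comm] at this; omega
        rw [hmm]
        rfl
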